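-- pv_equiv track=rewrite | github.com/sohamjadhav95/Neuro-Intelligence | Main_Programs/Main_v3.0 Deployment/Main_Exucution_Engine.py | normalize_parameters
-- ===== SOURCE A (Python) =====
-- PARAMETER_ALIASES = {
--     'click on': ['element_name', 'item', 'text', 'target', 'target_name'],
--     'write text': ['text', 'content', 'message'],
--     'open website': ['url', 'website', 'link'],
--     'open application': ['application', 'app', 'program', 'name'],
--     'close application': ['application', 'app', 'program', 'name'],
--     'web search': ['query', 'search', 'text'],
--     'youtube search': ['query', 'search', 'text'],
--     'get weather': ['city_name', 'city', 'location'],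
--     'open browser': ['browser', 'name'],
--     # Add more as needed
-- }
--
-- def normalize_parameters(action, parameters):
--     """Map incoming parameters to the expected argument names for the command."""
--     if not parameters:
--         return {}
--     if action in PARAMETER_ALIASES:
--         aliases = PARAMETER_ALIASES[action]
--         # Try to match any alias
--         for expected in aliases:
--             for key in parameters:
--                 if key == expected:
--                     return {expected: parameters[key]}
--             for key in parameters:
--                 if key in aliases:
--                     return {expected: parameters[key]}
--         # If no match, just return the first value with the expected key
--         if parameters:
--             value = list(parameters.values())[0]
--             return {aliases[0]: value}
--     # If not in aliases, try to use the first value as positional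
--     if parameters:
--         return {list(parameters.keys())[0]: list(parameters.values())[0]}
--     return parameters
-- ===== SOURCE B (Python) =====
-- PARAMETER_ALIASES = {
--     'click on': ['element_name', 'item', 'text', 'target', 'target_name'],
--     'write text': ['text', 'content', 'message'],
--     'open website': ['url', 'website', 'link'],
--     'open application': ['application', 'app', 'program', 'name'],
--     'close application': ['application', 'app', 'program', 'name'],
--     'web search': ['query', 'search', 'text'],
--     'youtube search': ['query', 'search', 'text'],
--     'get weather': ['city_name', 'city', 'location'],
--     'open browser': ['browser', 'name'],
-- }
--
-- def normalize_parameters(action, parameters):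
--     """Map incoming parameters to the expected argument names for the command."""
--     if not parameters:
--         return {}
--     aliases = PARAMETER_ALIASES.get(action)
--     if aliases is None:
--         k = next(iter(parameters))
--         return {k: parameters[k]}
--     first = aliases[0]
--     if first in parameters:
--         return {first: parameters[first]}
--     for k in parameters:
--         if k in aliases:
--             return {first: parameters[k]}
--     return {first: next(iter(parameters.values()))}
-- ===== Notes on version B (the rewrite author's own statement) =====
-- stated objective: simpler
-- what changed: A's triple-nested alias loop is replaced by a loop-free priority: aliases[0] if present, else the first parameter key that is any alias, else the first value under aliases[0]; the loop over all aliases disappears because A's outer loop can never return past its first iteration.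
import Mathlib
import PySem

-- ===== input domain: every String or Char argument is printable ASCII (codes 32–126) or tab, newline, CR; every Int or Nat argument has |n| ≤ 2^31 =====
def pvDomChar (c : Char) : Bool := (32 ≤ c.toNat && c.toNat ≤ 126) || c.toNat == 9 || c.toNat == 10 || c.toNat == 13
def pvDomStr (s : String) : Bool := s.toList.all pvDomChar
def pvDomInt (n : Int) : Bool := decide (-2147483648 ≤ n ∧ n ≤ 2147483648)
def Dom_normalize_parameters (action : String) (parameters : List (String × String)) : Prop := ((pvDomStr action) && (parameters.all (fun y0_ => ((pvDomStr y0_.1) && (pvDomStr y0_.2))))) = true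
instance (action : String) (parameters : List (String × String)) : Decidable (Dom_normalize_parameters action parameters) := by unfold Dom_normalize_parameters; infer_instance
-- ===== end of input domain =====

-- B replaces A's triple-nested alias loop by a loop-free priority check (aliases[0] present /
-- first key that is any alias / first value), a simpler decomposition; same return values.


-- ===== PORT A =====
def PARAMETER_ALIASES : PySem.Dict String (List String) := PySem.Dict.mk [
  ("click on", ["element_name", "item", "text", "target", "target_name"]),
  ("write text", ["text", "content", "message"]),
  ("open website", ["url", "website", "link"]),
  ("open application", ["application", "app", "program", "name"]),
  ("close application", ["application", "app", "program", "name"]),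
  ("web search", ["query", "search", "text"]),
  ("youtube search", ["query", "search", "text"]),
  ("get weather", ["city_name", "city", "location"]),
  ("open browser", ["browser", "name"])]

-- parameters[key]: Python dict lookup = first match in the association list
def pvParamGet (parameters : List (String × String)) (key : String) : String :=
  (PySem.Dict.mk parameters).getD key ""

-- A's 'for expected in aliases' loop with its two inner 'for key in parameters' loops;
-- returns some result on an early return, none when the loop falls through.
def normLoopA (todo : List String) (aliases : List String) (parameters : List (String × String)) :
    Option (List (String × String)) :=
  match todo with
  | [] => none
  | expected :: rest =>
    match parameters.find? (fun kv => kv.1 == expected) with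
    | some kv => some [(expected, pvParamGet parameters kv.1)]
    | none =>
      match parameters.find? (fun kv => aliases.contains kv.1) with
      | some kv => some [(expected, pvParamGet parameters kv.1)]
      | none => normLoopA rest aliases parameters

def normalize_parameters (action : String) (parameters : List (String × String)) : List (String × String) :=
  if parameters.isEmpty then []
  else
    match PARAMETER_ALIASES.get? action with
    | some aliases =>
      match normLoopA aliases aliases parameters with
      | some r => r
      | none =>
        -- value = list(parameters.values())[0]; return {aliases[0]: value}
        match parameters with
        | [] => []   -- unreachable: parameters nonempty here
        | (_, v) :: _ => [(aliases.headD "", v)]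
    | none =>
      -- return {list(parameters.keys())[0]: list(parameters.values())[0]}
      match parameters with
      | [] => []
      | (k, v) :: _ => [(k, v)]

-- ===== PORT B =====
def normalize_parameters_alt (action : String) (parameters : List (String × String)) : List (String × String) :=
  match parameters with
  | [] => []
  | (k0, v0) :: _ =>
    match PARAMETER_ALIASES.get? action with
    | none => [(k0, (PySem.Dict.mk parameters).getD k0 "")]
    | some aliases =>
      let first := aliases.headD ""
      match (PySem.Dict.mk parameters).get? first with
      | some v => [(first, v)]
      | none =>
        match parameters.find? (fun kv => aliases.contains kv.1) with
        | some kv => [(first, (PySem.Dict.mk parameters).getD kv.1 "")]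
        | none => [(first, v0)]

-- ===== PRECONDITION & SPEC =====
def Spec_normalize_parameters (action : String) (parameters : List (String × String)) (out : List (String × String)) : Prop := out = normalize_parameters_alt action parameters
instance (action : String) (parameters : List (String × String)) (out : List (String × String)) : Decidable (Spec_normalize_parameters action parameters out) := by unfold Spec_normalize_parameters; infer_instance

-- ===== CLAIM (what is proved, stated in full; the proofs are below) =====
def Claim_equal_normalize_parameters : Prop := ∀ (action : String) (parameters : List (String × String)), Dom_normalize_parameters action parameters → Spec_normalize_parameters action parameters (normalize_parameters action parameters)

-- ===== LEMMAS AND PROOFS =====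

-- If no parameter key is in the full alias list, A's alias loop falls through (returns none)
-- for any sublist of the aliases.
theorem normLoopA_none (todo aliases : List String) (parameters : List (String × String))
    (hnone : parameters.find? (fun kv => aliases.contains kv.1) = none)
    (hsub : ∀ e ∈ todo, e ∈ aliases) :
    normLoopA todo aliases parameters = none := by
  induction todo with
  | nil => rfl
  | cons e rest ih =>
    have h1 : parameters.find? (fun kv => kv.1 == e) = none := by
      rw [List.find?_eq_none] at hnone ⊢
      intro kv hkv hke
      apply hnone kv hkv
      simp only [List.contains_eq_mem, decide_eq_true_eq]
      rw [show kv.1 = e from beq_iff_eq.mp hke]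
      exact hsub e (by simp)
    simp only [normLoopA, h1, hnone]
    exact ih (fun e' he' => hsub e' (by simp [he']))

-- first-match find? on the key equals the Dict lookup on a literal association list
theorem dict_get?_eq_find? (parameters : List (String × String)) (k : String) :
    (PySem.Dict.mk parameters).get? k = (parameters.find? (fun kv => kv.1 == k)).map (·.2) := by
  induction parameters with
  | nil => simp [PySem.Dict.get?]
  | cons kv rest ih =>
    rw [PySem.Dict.get?_mk_cons, List.find?_cons]
    by_cases h : kv.1 = k
    · simp [h]
    · simp only [beq_iff_eq, h, if_false, ih]
      have : (kv.1 == k) = false := by simp [h]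
      simp [this]

-- every alias list stored in PARAMETER_ALIASES is nonempty
theorem aliases_nonempty (action : String) (al : List String)
    (h : PARAMETER_ALIASES.get? action = some al) : al ≠ [] := by
  have hmem := PySem.Dict.mem_items_of_get?_eq_some PARAMETER_ALIASES h
  have hall : ∀ p ∈ PARAMETER_ALIASES.items, p.2 ≠ ([] : List String) := by decide
  exact hall _ hmem

-- ===== VERDICT (by name: the statement is the Claim_ definition above) =====
theorem normalize_parameters_spec : Claim_equal_normalize_parameters := by
  intro action parameters _
  unfold Spec_normalize_parameters normalize_parameters normalize_parameters_alt
  cases parameters with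
  | nil => simp
  | cons p rest =>
    obtain ⟨k0, v0⟩ := p
    simp only [List.isEmpty_cons, if_false, Bool.false_eq_true]
    cases hA : PARAMETER_ALIASES.get? action with
    | none =>
      -- unknown action: A returns first pair; B looks the first key up again (first match = v0)
      have : (PySem.Dict.mk ((k0, v0) :: rest)).getD k0 "" = v0 := by
        rw [PySem.Dict.getD_eq_get?_getD, PySem.Dict.get?_mk_cons]; simp
      simp [this]
    | some aliases =>
      cases aliases with
      | nil => exact absurd (aliases_nonempty action [] hA) (by simp)
      | cons e0 restAl =>
        simp only [List.headD_cons, normLoopA]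
        have hg : (PySem.Dict.mk ((k0, v0) :: rest)).get? e0 =
            ((((k0, v0) :: rest)).find? (fun kv => kv.1 == e0)).map (·.2) :=
          dict_get?_eq_find? _ _
        cases hf : (((k0, v0) :: rest)).find? (fun kv => kv.1 == e0) with
        | some kv =>
          -- aliases[0] is a parameter key: both return {e0: parameters[e0]}
          have hk : kv.1 = e0 := by
            have := List.find?_some hf
            simpa using this
          simp only [hf, Option.map_some] at hg
          have hv : pvParamGet ((k0, v0) :: rest) e0 = kv.2 := by
            unfold pvParamGet
            rw [PySem.Dict.getD_eq_get?_getD, hg]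
            rfl
          simp [hg, hk, hv]
        | none =>
          simp only [hf, Option.map_none] at hg
          cases hf2 : (((k0, v0) :: rest)).find? (fun kv => (e0 :: restAl).contains kv.1) with
          | some kv =>
            -- some parameter key is an alias: both return {e0: parameters[that key]}
            have hv : pvParamGet ((k0, v0) :: rest) kv.1 = (PySem.Dict.mk ((k0, v0) :: rest)).getD kv.1 "" := rfl
            simp [hg, hv]
          | none =>
            -- no parameter key is an alias: A's loop falls through, both take the fallback
            have hrest : normLoopA restAl (e0 :: restAl) ((k0, v0) :: rest) = none :=
              normLoopA_none restAl (e0 :: restAl) ((k0, v0) :: rest) hf2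
                (fun e' he' => by simp [he'])
            simp [hg, hrest]
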